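-- pv_equiv track=rewrite | github.com/jk-jung/problem-solving | codewars/6kyu/6_Binary multiplication..py | bin_mul
-- ===== SOURCE A (Python) =====
-- def bin_mul(m,n):
--     if m < n: m, n = n, m
--     r = []
--     while m and n:
--         if m % 2: r.append(n)
--         m //= 2
--         n *= 2
--     return r[::-1]
-- ===== SOURCE B (Python) =====
-- def bin_mul(m, n):
--     if m < n:
--         m, n = n, m
--     if m <= 0 or n == 0:
--         return []
--     return [n << i for i in reversed(range(m.bit_length())) if m >> i & 1]
-- ===== Notes on version B (the rewrite author's own statement) =====
-- stated objective: simpler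
-- what changed: B lists the partial products directly as closed-form shifts n << i over m's set bit positions in MSB-first order, replacing A's mutating halve/double accumulator loop and final reversal.
import Mathlib
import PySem

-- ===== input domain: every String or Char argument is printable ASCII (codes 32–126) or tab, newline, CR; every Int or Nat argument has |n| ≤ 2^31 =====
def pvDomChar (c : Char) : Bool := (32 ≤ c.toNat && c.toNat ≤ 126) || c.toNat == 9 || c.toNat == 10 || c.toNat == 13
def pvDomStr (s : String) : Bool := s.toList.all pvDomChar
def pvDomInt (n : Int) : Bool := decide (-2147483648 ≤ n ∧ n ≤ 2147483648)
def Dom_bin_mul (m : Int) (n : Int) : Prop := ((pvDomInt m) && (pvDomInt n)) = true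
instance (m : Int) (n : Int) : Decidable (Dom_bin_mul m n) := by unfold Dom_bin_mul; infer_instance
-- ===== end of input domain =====

-- B lists the partial products by a closed-form shift per set bit of m, MSB-first,
-- instead of A's doubling accumulator plus final reversal (objective: simpler).

-- ===== PORT A =====
-- the while loop; fuel (m.toNat + 1) is a totality guard only: inside Pre_ the loop
-- runs at most bit_length(m) ≤ m.toNat steps before m reaches 0
def binMulGo : Nat → Int → Int → List Int → List Int
  | 0, _, _, r => r
  | fuel+1, m, n, r =>
    if m ≠ 0 ∧ n ≠ 0 then
      binMulGo fuel (PySem.Int.floordiv m 2) (n * 2)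
        (if PySem.Int.mod m 2 ≠ 0 then r ++ [n] else r)
    else r

def bin_mul (m : Int) (n : Int) : List Int :=
  let p := if m < n then (n, m) else (m, n)
  (binMulGo (p.1.toNat + 1) p.1 p.2 []).reverse

-- ===== PORT B =====
def bin_mul_alt (m : Int) (n : Int) : List Int :=
  let p := if m < n then (n, m) else (m, n)
  if p.1 ≤ 0 ∨ p.2 = 0 then []
  else
    ((List.range (PySem.Int.bitLength p.1)).reverse.filter
        (fun i : Nat => PySem.Int.band (p.1 >>> i) 1 != 0)).map (fun i : Nat => p.2 <<< i)

-- ===== PRECONDITION & SPEC =====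
-- Pre_ excludes inputs where both arguments are negative: there A's while loop never
-- terminates (m //= 2 stalls at -1), so A returns no value to match.
def Pre_bin_mul (m : Int) (n : Int) : Prop := 0 ≤ m ∨ 0 ≤ n
instance (m : Int) (n : Int) : Decidable (Pre_bin_mul m n) := by unfold Pre_bin_mul; infer_instance
def pvWitness_bin_mul : Int × Int := (6, 5)

def Spec_bin_mul (m : Int) (n : Int) (out : List Int) : Prop := out = bin_mul_alt m n
instance (m : Int) (n : Int) (out : List Int) : Decidable (Spec_bin_mul m n out) := by unfold Spec_bin_mul; infer_instance

-- ===== CLAIM (what is proved, stated in full; the proofs are below) =====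
def Claim_equal_bin_mul : Prop := ∀ (m : Int) (n : Int), Dom_bin_mul m n → Pre_bin_mul m n → Spec_bin_mul m n (bin_mul m n)

-- ===== LEMMAS AND PROOFS =====

-- ascending-order list of partial products, as A's loop accumulates them
def ascPP (a : Nat) (N : Int) : List Int :=
  if h : a = 0 then [] else (if a % 2 = 1 then [N] else []) ++ ascPP (a / 2) (N * 2)
termination_by a
decreasing_by exact Nat.div_lt_self (Nat.pos_of_ne_zero h) (by omega)

theorem binMulGo_eq (fuel : Nat) : ∀ (a : Nat) (N : Int) (r : List Int),
    a < 2 ^ fuel → N ≠ 0 → binMulGo fuel (a : Int) N r = r ++ ascPP a N := by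
  induction fuel with
  | zero =>
    intro a N r ha hN
    have h0 : a = 0 := by simpa using ha
    subst h0; rw [ascPP]; simp [binMulGo]
  | succ fuel ih =>
    intro a N r ha hN
    by_cases h0 : a = 0
    · subst h0; rw [ascPP]; simp [binMulGo]
    · have hm : ((a : Int) ≠ 0) := by exact_mod_cast h0
      have hdiv : PySem.Int.floordiv (a : Int) 2 = ((a / 2 : Nat) : Int) := by
        exact_mod_cast PySem.Int.floordiv_natCast a 2
      have hmod : PySem.Int.mod (a : Int) 2 = ((a % 2 : Nat) : Int) := by
        exact_mod_cast PySem.Int.mod_natCast a 2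
      have hpow : 2 ^ (fuel + 1) = 2 * 2 ^ fuel := by ring
      have hrec : ∀ r' : List Int, binMulGo fuel ((a / 2 : Nat) : Int) (N * 2) r'
          = r' ++ ascPP (a / 2) (N * 2) :=
        fun r' => ih (a / 2) (N * 2) r' (by omega) (by simpa using hN)
      show (if (a : Int) ≠ 0 ∧ N ≠ 0 then
          binMulGo fuel (PySem.Int.floordiv (a : Int) 2) (N * 2)
            (if PySem.Int.mod (a : Int) 2 ≠ 0 then r ++ [N] else r)
        else r) = r ++ ascPP a N
      rw [if_pos ⟨hm, hN⟩, hdiv, hmod, ascPP, dif_neg h0]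
      by_cases hodd : a % 2 = 1
      · rw [if_pos (show ((a % 2 : Nat) : Int) ≠ 0 by exact_mod_cast (by omega : (a % 2) ≠ 0)),
          hrec (r ++ [N]), if_pos hodd]
        simp
      · rw [if_neg (by push_cast; omega), hrec r, if_neg hodd]
        simp

theorem ascPP_eq (k : Nat) : ∀ (a : Nat) (N : Int), a < 2 ^ k →
    ascPP a N = ((List.range k).filter (fun i => a.testBit i)).map (fun i => N * 2 ^ i) := by
  induction k with
  | zero =>
    intro a N h
    have h0 : a = 0 := by simpa using h
    subst h0; rw [ascPP]; simp
  | succ k ih =>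
    intro a N h
    by_cases h0 : a = 0
    · subst h0; rw [ascPP]; simp [Nat.zero_testBit]
    · rw [ascPP, dif_neg h0]
      have hpow : 2 ^ (k + 1) = 2 * 2 ^ k := by ring
      rw [ih (a / 2) (N * 2) (by omega)]
      rw [List.range_succ_eq_map, List.filter_cons]
      have hmap : (List.filter (fun i => a.testBit i) (List.map Nat.succ (List.range k)))
          = List.map Nat.succ (List.filter (fun i => (a / 2).testBit i) (List.range k)) := by
        rw [List.filter_map]
        exact congrArg _ (List.filter_congr (fun i _ => by
          simp [Function.comp_def, Nat.testBit_succ]))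
      have hshift : ∀ l : List Nat, (List.map Nat.succ l).map (fun i => N * 2 ^ i)
          = l.map (fun i => N * 2 * 2 ^ i) := by
        intro l
        rw [List.map_map]
        exact List.map_congr_left (fun i _ => by simp [Function.comp_def, pow_succ]; ring)
      by_cases hodd : a % 2 = 1
      · rw [if_pos hodd, if_pos (show a.testBit 0 = true by simp [Nat.testBit_zero, hodd])]
        rw [hmap, List.map_cons, hshift]
        simp
      · rw [if_neg hodd, if_neg (show ¬ a.testBit 0 = true by simp [Nat.testBit_zero, hodd])]
        rw [hmap, hshift]
        simp

theorem bin_mul_main (M N : Int) (hM : 0 ≤ M) :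
    (binMulGo (M.toNat + 1) M N []).reverse
      = if M ≤ 0 ∨ N = 0 then []
        else ((List.range (PySem.Int.bitLength M)).reverse.filter
                (fun i : Nat => PySem.Int.band (M >>> i) 1 != 0)).map (fun i : Nat => N <<< i) := by
  by_cases hM0 : M = 0
  · subst hM0; simp [binMulGo]
  · have hMpos : 0 < M := lt_of_le_of_ne hM (Ne.symm hM0)
    by_cases hN : N = 0
    · subst hN
      rw [if_pos (Or.inr rfl)]
      rw [show binMulGo (M.toNat + 1) M 0 [] = [] from by simp [binMulGo]]
      simp
    · rw [if_neg (by push_neg; exact ⟨by omega, hN⟩)]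
      obtain ⟨a, rfl⟩ : ∃ a : Nat, M = (a : Int) := ⟨M.toNat, (Int.toNat_of_nonneg hM).symm⟩
      have h0 : a ≠ 0 := by exact_mod_cast hM0
      rw [show ((a : Int)).toNat = a from Int.toNat_natCast a]
      rw [binMulGo_eq (a + 1) a N []
            (lt_of_lt_of_le (Nat.lt_two_pow_self) (Nat.pow_le_pow_right (by omega) (by omega)))
            hN]
      have hbl : a < 2 ^ PySem.Int.bitLength (a : Int) := by
        have := PySem.Int.lt_two_pow_bitLength (a : Int)
        simpa using this
      rw [List.nil_append, ascPP_eq _ a N hbl]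
      have hpred : (fun i : Nat => PySem.Int.band ((a : Int) >>> i) 1 != 0)
          = (fun i : Nat => a.testBit i) := by
        funext i
        rw [show ((a : Int) >>> i) = ((a >>> i : Nat) : Int) from by
              simp [Int.natCast_shiftRight]]
        rw [show (1 : Int) = ((1 : Nat) : Int) from rfl, PySem.Int.band_natCast]
        rw [Nat.and_one_is_mod, Nat.shiftRight_eq_div_pow]
        rcases Nat.mod_two_eq_zero_or_one (a / 2 ^ i) with hv | hv <;>
          simp [hv, Nat.testBit_eq_decide_div_mod_eq, Nat.testBit, Nat.shiftRight_eq_div_pow,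
            Nat.and_one_is_mod]
      have hfun : (fun i : Nat => N <<< i) = (fun i : Nat => N * 2 ^ i) := by
        funext i; rw [Int.shiftLeft_eq]
      rw [hpred, hfun, List.filter_reverse, List.map_reverse]

-- ===== VERDICT (by name: the statement is the Claim_ definition above) =====
theorem bin_mul_spec : Claim_equal_bin_mul := by
  unfold Claim_equal_bin_mul
  intro m n _ hpre
  unfold Spec_bin_mul bin_mul bin_mul_alt
  by_cases hmn : m < n
  · simp only [if_pos hmn]
    exact bin_mul_main n m (by unfold Pre_bin_mul at hpre; omega)
  · simp only [if_neg hmn]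
    exact bin_mul_main m n (by unfold Pre_bin_mul at hpre; omega)
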